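-- pv_equiv track=rewrite | github.com/yzooop/Algorithm | 프로그래머스/0/120891. 369게임/369게임.py | solution
-- ===== SOURCE A (Python) =====
-- def solution(order):
--     ans = 0
--     for i in str(order):
--         if i == "3":
--             ans += 1
--         elif i == "6":
--             ans += 1
--         elif i == "9":
--             ans += 1
--     return ans
-- ===== SOURCE B (Python) =====
-- def solution(order):
--     ans = 0
--     n = abs(order)
--     while n > 0:
--         d = n % 10
--         n //= 10
--         if d in (3, 6, 9):
--             ans += 1
--     return ans
-- ===== Notes on version B (the rewrite author's own statement) =====
-- stated objective: alternative
-- what changed: Replaces the scan over str(order) with arithmetic digit extraction (repeated modulo/floor-division by ten on abs(order)), counting the clap digits of the game; no string is built.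
import Mathlib
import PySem

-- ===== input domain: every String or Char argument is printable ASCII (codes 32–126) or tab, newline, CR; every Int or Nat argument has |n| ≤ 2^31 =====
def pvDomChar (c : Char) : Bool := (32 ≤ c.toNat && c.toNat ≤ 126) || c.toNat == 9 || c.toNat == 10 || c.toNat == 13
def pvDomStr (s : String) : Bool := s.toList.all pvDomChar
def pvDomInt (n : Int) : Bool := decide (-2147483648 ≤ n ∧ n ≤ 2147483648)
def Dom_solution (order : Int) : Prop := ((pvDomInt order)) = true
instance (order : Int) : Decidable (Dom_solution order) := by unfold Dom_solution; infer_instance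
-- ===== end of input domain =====

-- B counts the clap digits (three, six, nine) by arithmetic extraction on abs(order) instead of scanning str(order); alternative decomposition, same cost.

-- ===== PORT A =====
def solution (order : Int) : Int :=
  (PySem.Int.toStr order).toList.foldl
    (fun ans i =>
      if i == '3' then ans + 1
      else if i == '6' then ans + 1
      else if i == '9' then ans + 1
      else ans) 0

-- ===== PORT B =====
-- the while loop of Source B: state (n, ans)
def solution_alt_go (n : Nat) (ans : Int) : Int :=
  if h : n = 0 then ans
  else solution_alt_go (n / 10)
    (ans + (if n % 10 = 3 ∨ n % 10 = 6 ∨ n % 10 = 9 then 1 else 0))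
decreasing_by exact Nat.div_lt_self (Nat.pos_of_ne_zero h) (by norm_num)

def solution_alt (order : Int) : Int := solution_alt_go order.natAbs 0

-- ===== PRECONDITION & SPEC =====
def Spec_solution (order : Int) (out : Int) : Prop := out = solution_alt order
instance (order : Int) (out : Int) : Decidable (Spec_solution order out) := by unfold Spec_solution; infer_instance

-- ===== CLAIM (what is proved, stated in full; the proofs are below) =====
def Claim_equal_solution : Prop := ∀ (order : Int), Dom_solution order → Spec_solution order (solution order)

-- ===== LEMMAS AND PROOFS =====

-- A's fold function, named for the proofs
def Fa : Int → Char → Int := fun ans i =>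
  if i == '3' then ans + 1
  else if i == '6' then ans + 1
  else if i == '9' then ans + 1
  else ans

-- acc-free version of B's loop
def cnt (n : Nat) : Int :=
  if h : n = 0 then 0
  else (if n % 10 = 3 ∨ n % 10 = 6 ∨ n % 10 = 9 then (1 : Int) else 0) + cnt (n / 10)
decreasing_by exact Nat.div_lt_self (Nat.pos_of_ne_zero h) (by norm_num)

lemma go_eq_cnt : ∀ n : Nat, ∀ a : Int, solution_alt_go n a = a + cnt n := by
  intro n
  induction n using Nat.strong_induction_on with
  | _ n ih =>
    intro a
    rw [solution_alt_go, cnt]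
    by_cases h : n = 0
    · simp [h]
    · simp only [h, dif_neg, not_false_iff]
      rw [ih (n / 10) (Nat.div_lt_self (Nat.pos_of_ne_zero h) (by norm_num))]
      ring

lemma Fa_shift (a : Int) (c : Char) : Fa a c = a + Fa 0 c := by
  unfold Fa; split_ifs <;> ring

lemma foldl_Fa_shift : ∀ (l : List Char) (a : Int), l.foldl Fa a = a + l.foldl Fa 0 := by
  intro l
  induction l with
  | nil => intro a; simp
  | cons c l ih =>
    intro a
    simp only [List.foldl_cons]
    rw [ih (Fa a c), ih (Fa 0 c), Fa_shift]
    ring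

lemma foldl_Fa_cons (c : Char) (l : List Char) :
    (c :: l).foldl Fa 0 = Fa 0 c + l.foldl Fa 0 := by
  simp only [List.foldl_cons]
  rw [foldl_Fa_shift]

lemma Fa_digitChar (m : Nat) (h : m < 10) :
    Fa 0 (Nat.digitChar m) = (if m = 3 ∨ m = 6 ∨ m = 9 then (1 : Int) else 0) := by
  interval_cases m <;> decide

lemma key : ∀ (f n : Nat) (acc : List Char), n < 10 ^ f →
    (Nat.toDigitsCore 10 f n acc).foldl Fa 0 = cnt n + acc.foldl Fa 0 := by
  intro f
  induction f with
  | zero =>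
    intro n acc h
    have hn : n = 0 := by omega
    subst hn
    simp [Nat.toDigitsCore, cnt]
  | succ f ih =>
    intro n acc h
    rw [Nat.toDigitsCore]
    by_cases h0 : n / 10 = 0
    · simp only [h0, if_true]
      rw [foldl_Fa_cons, Fa_digitChar (n % 10) (Nat.mod_lt _ (by norm_num))]
      by_cases hn : n = 0
      · subst hn; simp [cnt]
      · rw [cnt]
        simp only [hn, dif_neg, not_false_iff, h0]
        rw [cnt]
        simp
    · simp only [h0, if_false]
      have hlt : n / 10 < 10 ^ f := by
        apply Nat.div_lt_of_lt_mul
        calc n < 10 ^ (f + 1) := h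
        _ = 10 * 10 ^ f := by ring
      rw [ih (n / 10) _ hlt, foldl_Fa_cons,
          Fa_digitChar (n % 10) (Nat.mod_lt _ (by norm_num))]
      have hn : n ≠ 0 := fun hc => h0 (by simp [hc])
      conv_rhs => rw [cnt]
      simp only [hn, dif_neg, not_false_iff]
      ring

lemma foldl_toDigits (m : Nat) : (Nat.toDigits 10 m).foldl Fa 0 = cnt m := by
  have h : m < 10 ^ (m + 1) := by
    calc m < 10 ^ m := Nat.lt_pow_self (by norm_num)
    _ ≤ 10 ^ (m + 1) := Nat.pow_le_pow_right (by norm_num) (Nat.le_succ m)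
  have := key (m + 1) m [] h
  simpa [Nat.toDigits] using this

lemma solution_eq (order : Int) : solution order = cnt order.natAbs := by
  unfold solution
  rw [show (PySem.Int.toStr order).toList = PySem.Int.toChars order from
    PySem.Int.toList_toStr order]
  unfold PySem.Int.toChars
  by_cases h : order < 0
  · simp only [h, if_true]
    have : ('-' :: Nat.toDigits 10 order.natAbs).foldl Fa 0 =
        (Nat.toDigits 10 order.natAbs).foldl Fa 0 := by
      rw [foldl_Fa_cons]; simp [Fa]
    calc ('-' :: Nat.toDigits 10 order.natAbs).foldl
          (fun ans i => if i == '3' then ans + 1 else if i == '6' then ans + 1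
            else if i == '9' then ans + 1 else ans) 0
        = ('-' :: Nat.toDigits 10 order.natAbs).foldl Fa 0 := rfl
      _ = (Nat.toDigits 10 order.natAbs).foldl Fa 0 := this
      _ = cnt order.natAbs := foldl_toDigits _
  · simp only [h, if_false]
    have ht : order.toNat = order.natAbs := by omega
    calc (Nat.toDigits 10 order.toNat).foldl
          (fun ans i => if i == '3' then ans + 1 else if i == '6' then ans + 1
            else if i == '9' then ans + 1 else ans) 0
        = (Nat.toDigits 10 order.toNat).foldl Fa 0 := rfl
      _ = cnt order.toNat := foldl_toDigits _
      _ = cnt order.natAbs := by rw [ht]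

-- ===== VERDICT (by name: the statement is the Claim_ definition above) =====
theorem solution_spec : Claim_equal_solution := by
  intro order _
  unfold Spec_solution solution_alt
  rw [go_eq_cnt, solution_eq]
  ring
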